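-- pv_equiv track=rewrite | github.com/Calesi19/Degree-Planner-Scraper | student.py | getCourseCode
-- ===== SOURCE A (Python) =====
-- def getCourseCode(courseText):
--     text = ''
--     for char in courseText:
--         if char == "-":
--             break
--         else:
--             if char == " ":
--                 pass
--             else:
--                 text += char
--     return text
-- ===== SOURCE B (Python) =====
-- def getCourseCode(courseText):
--     return courseText.split('-')[0].replace(' ', '')
-- ===== Notes on version B (the rewrite author's own statement) =====
-- stated objective: faster
-- what changed: Replaces the fused per-character loop (break at dash, skip spaces, accumulate) with two library passes: split on the first dash, then delete spaces with replace; same O(n) but C-level passes instead of Python-level iteration.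
import Mathlib
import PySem

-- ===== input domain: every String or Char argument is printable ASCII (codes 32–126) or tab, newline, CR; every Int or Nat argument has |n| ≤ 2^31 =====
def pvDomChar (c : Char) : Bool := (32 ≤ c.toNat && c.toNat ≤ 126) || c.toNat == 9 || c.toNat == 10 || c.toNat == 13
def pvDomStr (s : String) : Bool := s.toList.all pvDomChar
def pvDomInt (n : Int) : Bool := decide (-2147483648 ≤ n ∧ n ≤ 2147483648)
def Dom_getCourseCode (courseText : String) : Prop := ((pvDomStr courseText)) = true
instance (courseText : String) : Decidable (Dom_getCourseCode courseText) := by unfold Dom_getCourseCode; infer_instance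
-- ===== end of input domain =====

-- B replaces A's fused character loop with split('-')[0] + replace(' ', ''): same values, idiomatic.


-- ===== PORT A =====
-- A's for-loop with break: structural recursion over the characters with the accumulated string.
def getCourseCodeGo : List Char → String → String
  | [], text => text
  | c :: rest, text =>
    if c = '-' then text            -- break
    else if c = ' ' then getCourseCodeGo rest text   -- pass
    else getCourseCodeGo rest (text.push c)          -- text += char

def getCourseCode (courseText : String) : String :=
  getCourseCodeGo courseText.toList ""

-- ===== PORT B =====
-- courseText.split('-')[0].replace(' ', ''); split with a nonempty separator never returns an
-- empty list and never raises, so the [0] lookup's default is unreachable.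
def getCourseCode_alt (courseText : String) : String :=
  let parts : List String := (PySem.Str.split? courseText "-").getD []
  let head : String := (PySem.List.pyGet? parts 0).getD ""
  PySem.Str.replace head " " ""

-- ===== PRECONDITION & SPEC =====
def Spec_getCourseCode (courseText : String) (out : String) : Prop := out = getCourseCode_alt courseText
instance (courseText : String) (out : String) : Decidable (Spec_getCourseCode courseText out) := by unfold Spec_getCourseCode; infer_instance

-- ===== CLAIM (what is proved, stated in full; the proofs are below) =====
def Claim_equal_getCourseCode : Prop := ∀ (courseText : String), Dom_getCourseCode courseText → Spec_getCourseCode courseText (getCourseCode courseText)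

-- ===== LEMMAS AND PROOFS =====

-- A's loop computes: accumulator ++ (spaces filtered out of the prefix before the first dash).
theorem getCourseCodeGo_toList (cs : List Char) : ∀ (acc : String),
    (getCourseCodeGo cs acc).toList
      = acc.toList ++ (cs.takeWhile (· != '-')).filter (· != ' ') := by
  induction cs with
  | nil => intro acc; simp [getCourseCodeGo]
  | cons c rest ih =>
    intro acc
    by_cases hc : c = '-'
    · simp [getCourseCodeGo, hc]
    · by_cases hs : c = ' '
      · simp [getCourseCodeGo, hs, ih]
      · simp only [getCourseCodeGo, if_neg hc, if_neg hs, ih]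
        simp [hc, hs]

-- head of the result of splitOn.go with a one-char separator, empty outer accumulator.
theorem splitOnGo_headD_ne (sep : List Char) : ∀ (fuel : Nat) (l cur acc : List Char)
    (accs : List (List Char)),
    (PySem.Chars.splitOn.go sep fuel l cur (accs ++ [acc])).headD [] = acc := by
  intro fuel
  induction fuel with
  | zero => intro l cur acc accs; simp [PySem.Chars.splitOn.go]
  | succ n ih =>
    intro l cur acc accs
    cases l with
    | nil => simp [PySem.Chars.splitOn.go]
    | cons c rest =>
      simp only [PySem.Chars.splitOn.go]
      split
      · have := ih (List.drop sep.length (c :: rest)) [] acc (cur.reverse :: accs)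
        simpa using this
      · exact ih rest (c :: cur) acc accs

theorem splitOnGo_headD (d : Char) : ∀ (fuel : Nat) (l cur : List Char), l.length ≤ fuel →
    (PySem.Chars.splitOn.go [d] fuel l cur []).headD []
      = cur.reverse ++ l.takeWhile (· != d) := by
  intro fuel
  induction fuel with
  | zero =>
    intro l cur h
    have : l = [] := List.eq_nil_of_length_eq_zero (Nat.le_zero.mp h)
    subst this; simp [PySem.Chars.splitOn.go]
  | succ n ih =>
    intro l cur h
    cases l with
    | nil => simp [PySem.Chars.splitOn.go]
    | cons c rest =>
      simp only [PySem.Chars.splitOn.go]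
      by_cases hc : c = d
      · have hpre : [d].isPrefixOf (c :: rest) = true := by simp [List.isPrefixOf, hc]
        rw [if_pos hpre]
        have := splitOnGo_headD_ne [d] n (List.drop 1 (c :: rest)) [] cur.reverse []
        simpa [List.takeWhile_cons, hc] using this
      · have hpre : [d].isPrefixOf (c :: rest) = false := by
          simp [List.isPrefixOf]; exact fun h' => absurd h'.symm hc
        rw [if_neg (by simp [hpre])]
        rw [ih rest (c :: cur) (by simpa using Nat.le_of_succ_le_succ h)]
        simp [hc]

theorem splitOn_headD (s : List Char) (d : Char) :
    (PySem.Chars.splitOn s [d]).headD [] = s.takeWhile (· != d) := by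
  unfold PySem.Chars.splitOn
  simpa using splitOnGo_headD d (s.length + 1) s [] (Nat.le_succ _)

-- replace.go deleting a single character is a filter.
theorem replaceGo_filter (d : Char) : ∀ (fuel : Nat) (l acc : List Char), l.length ≤ fuel →
    PySem.Chars.replace.go [d] [] fuel l acc = acc.reverse ++ l.filter (· != d) := by
  intro fuel
  induction fuel with
  | zero =>
    intro l acc h
    have : l = [] := List.eq_nil_of_length_eq_zero (Nat.le_zero.mp h)
    subst this; simp [PySem.Chars.replace.go]
  | succ n ih =>
    intro l acc h
    cases l with
    | nil => simp [PySem.Chars.replace.go]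
    | cons c rest =>
      simp only [PySem.Chars.replace.go]
      by_cases hc : c = d
      · have hpre : [d].isPrefixOf (c :: rest) = true := by simp [List.isPrefixOf, hc]
        rw [if_pos hpre]
        have := ih (List.drop 1 (c :: rest)) acc (by simpa using Nat.le_of_succ_le_succ h)
        simpa [List.filter_cons, hc] using this
      · have hpre : [d].isPrefixOf (c :: rest) = false := by
          simp [List.isPrefixOf]; exact fun h' => absurd h'.symm hc
        rw [if_neg (by simp [hpre])]
        have := ih rest (c :: acc) (by simpa using Nat.le_of_succ_le_succ h)
        simp [this, hc]

theorem chars_replace_filter (l : List Char) (d : Char) :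
    PySem.Chars.replace l [d] [] = l.filter (· != d) := by
  unfold PySem.Chars.replace
  simpa using replaceGo_filter d l.length l [] (Nat.le_refl _)

theorem pyGetD_zero_headD {α : Type} (l : List α) (d : α) :
    (PySem.List.pyGet? l 0).getD d = l.headD d := by
  cases l <;> simp [PySem.List.pyGet?, PySem.List.pyIdx?]

theorem headD_map_ofList (l : List (List Char)) :
    (l.map String.ofList).headD "" = String.ofList (l.headD []) := by
  cases l
  · rfl
  · rfl

-- ===== VERDICT (by name: the statement is the Claim_ definition above) =====
theorem getCourseCode_spec : Claim_equal_getCourseCode := by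
  intro s _
  show getCourseCode s = getCourseCode_alt s
  apply String.toList_inj.mp
  rw [getCourseCode, getCourseCodeGo_toList]
  rw [getCourseCode_alt]
  simp only [PySem.Str.split?, PySem.Chars.split?,
    show ("-" : String).toList = ['-'] from rfl]
  simp only [List.isEmpty_cons, Bool.false_eq_true, if_false, Option.map_some, Option.getD_some]
  rw [pyGetD_zero_headD, headD_map_ofList, splitOn_headD]
  rw [PySem.Str.replace]
  simp [chars_replace_filter, show (" " : String).toList = [' '] from rfl,
    show ("" : String).toList = ([] : List Char) from rfl]
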